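-- pv_equiv track=rewrite | github.com/zhao-bob/mrppg | leetcode/leet1335.py | minDifficulty1
-- ===== SOURCE A (Python) =====
-- import math
-- from typing import List
--
-- def minDifficulty1(jobDifficulty: List[int], d: int) -> int:
--     dp = [[math.inf for _ in range(d)] for _ in range(len(jobDifficulty))]
--     m = [[0 for _ in range(len(jobDifficulty))] for _ in range(len(jobDifficulty))]
--     for i in range(len(jobDifficulty)):
--         m[i][i] = jobDifficulty[i]
--         for j in range(i + 1, len(jobDifficulty)):
--             m[i][j] = max(m[i][j - 1], jobDifficulty[j])
--
--     dp[0][0] = jobDifficulty[0]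
--     for i in range(1, len(jobDifficulty)):
--         dp[i][0] = max(dp[i - 1][0], jobDifficulty[i])
--
--     for l in range(1, d):
--         for i in range(len(jobDifficulty)):
--             for j in range(l - 1, i):
--                 dp[i][l] = min(dp[i][l], dp[j][l - 1] + m[j + 1][i])
--     return -1 if dp[-1][d - 1] == math.inf else dp[-1][d - 1]
-- ===== SOURCE B (Python) =====
-- def minDifficulty1(jobDifficulty, d):
--     n = len(jobDifficulty)
--     if d > n:
--         return -1
--     # day 1: prefix maxima in one pass
--     dp = []
--     run = jobDifficulty[0]
--     for x in jobDifficulty: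
--         run = max(run, x)
--         dp.append(run)
--     # remaining days: monotonic-stack DP, O(n) per day.
--     # stack holds indices with strictly decreasing difficulty; ndp[j] for a
--     # stack index j is the optimal cost of scheduling jobs 0..j in l+1 days.
--     for l in range(1, d):
--         ndp = [0] * n
--         stack = []
--         for i in range(l, n):
--             cur = dp[i - 1] + jobDifficulty[i]
--             while stack and jobDifficulty[stack[-1]] <= jobDifficulty[i]:
--                 j = stack.pop()
--                 cur = min(cur, ndp[j] - jobDifficulty[j] + jobDifficulty[i])
--             if stack:
--                 cur = min(cur, ndp[stack[-1]])
--             ndp[i] = cur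
--             stack.append(i)
--         dp = ndp
--     return dp[n - 1]
-- ===== Notes on version B (the rewrite author's own statement) =====
-- stated objective: faster
-- what changed: Replaces A's precomputed n x n segment-max table plus triple-loop interval DP by the monotonic-stack DP: one left-to-right pass per day keeps a stack of indices with strictly decreasing difficulty whose stored day costs let each cell be computed in amortized O(1), and d > n returns -1 immediately.
import Mathlib
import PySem

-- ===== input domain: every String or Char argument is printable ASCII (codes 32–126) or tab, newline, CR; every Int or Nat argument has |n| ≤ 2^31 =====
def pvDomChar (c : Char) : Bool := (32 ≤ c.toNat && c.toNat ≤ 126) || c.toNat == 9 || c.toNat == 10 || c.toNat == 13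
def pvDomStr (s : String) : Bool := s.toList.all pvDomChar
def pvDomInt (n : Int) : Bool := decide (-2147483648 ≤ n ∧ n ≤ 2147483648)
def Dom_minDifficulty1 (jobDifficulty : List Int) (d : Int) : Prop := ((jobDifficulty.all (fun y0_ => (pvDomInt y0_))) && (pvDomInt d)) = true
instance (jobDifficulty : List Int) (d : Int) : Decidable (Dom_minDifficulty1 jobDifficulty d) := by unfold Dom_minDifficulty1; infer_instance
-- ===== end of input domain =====

-- B replaces A's O(n^2·d) table DP (precomputed n×n segment-max matrix + triple loop)
-- by the O(n·d) monotonic-stack DP: one left-to-right pass per day, a stack of indices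
-- with strictly decreasing difficulty carrying their already-optimal day cost.

-- ===== PORT A =====
-- math.inf is modelled as `none : Option Int`: the only operations A performs on it are
-- min, max, +int and ==inf, each modelled exactly by the helpers below.
def ominO : Option Int → Option Int → Option Int
  | none, b => b
  | some x, none => some x
  | some x, some y => some (min x y)

def oaddI (a : Option Int) (v : Int) : Option Int := a.map (· + v)

def omaxI (a : Option Int) (v : Int) : Option Int := a.map (fun x => max x v)

def mGet (mat : List (List Int)) (i j : Int) : Int :=
  PySem.List.pyGetD (PySem.List.pyGetD mat i []) j 0

def mSet (mat : List (List Int)) (i j : Int) (v : Int) : List (List Int) :=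
  PySem.List.pySetD mat i (PySem.List.pySetD (PySem.List.pyGetD mat i []) j v)

def dpGet (mat : List (List (Option Int))) (i j : Int) : Option Int :=
  PySem.List.pyGetD (PySem.List.pyGetD mat i []) j none

def dpSet (mat : List (List (Option Int))) (i j : Int) (v : Option Int) : List (List (Option Int)) :=
  PySem.List.pySetD mat i (PySem.List.pySetD (PySem.List.pyGetD mat i []) j v)

def minDifficulty1 (jobDifficulty : List Int) (d : Int) : Int :=
  let n : Int := PySem.List.len jobDifficulty
  let dp : List (List (Option Int)) :=
    (PySem.List.pyRange 0 n 1).map (fun _ => (PySem.List.pyRange 0 d 1).map (fun _ => (none : Option Int)))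
  let m0 : List (List Int) :=
    (PySem.List.pyRange 0 n 1).map (fun _ => (PySem.List.pyRange 0 n 1).map (fun _ => (0 : Int)))
  let m := (PySem.List.pyRange 0 n 1).foldl (fun mAcc i =>
      let mAcc := mSet mAcc i i (PySem.List.pyGetD jobDifficulty i 0)
      (PySem.List.pyRange (i + 1) n 1).foldl
        (fun mAcc j => mSet mAcc i j (max (mGet mAcc i (j - 1)) (PySem.List.pyGetD jobDifficulty j 0)))
        mAcc) m0
  let dp := dpSet dp 0 0 (some (PySem.List.pyGetD jobDifficulty 0 0))
  let dp := (PySem.List.pyRange 1 n 1).foldl (fun dpAcc i =>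
      dpSet dpAcc i 0 (omaxI (dpGet dpAcc (i - 1) 0) (PySem.List.pyGetD jobDifficulty i 0))) dp
  let dp := (PySem.List.pyRange 1 d 1).foldl (fun dpAcc l =>
      (PySem.List.pyRange 0 n 1).foldl (fun dpAcc i =>
        (PySem.List.pyRange (l - 1) i 1).foldl (fun dpAcc j =>
          dpSet dpAcc i l (ominO (dpGet dpAcc i l)
            (oaddI (dpGet dpAcc j (l - 1)) (mGet m (j + 1) i)))) dpAcc) dpAcc) dp
  match PySem.List.pyGetD (PySem.List.pyGetD dp (-1) []) (d - 1) none with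
  | none => -1
  | some v => v

-- ===== PORT B =====
-- the while-loop popping the stack; the Lean stack keeps the TOP AT THE HEAD
-- (Python appends/pops at the end of the list)
def bPop (jd : List Int) (ai : Int) (ndp : List Int) : List Int → Int → Int × List Int
  | [], cur => (cur, [])
  | j :: rest, cur =>
      if PySem.List.pyGetD jd j 0 ≤ ai then
        bPop jd ai ndp rest (min cur (PySem.List.pyGetD ndp j 0 - PySem.List.pyGetD jd j 0 + ai))
      else (cur, j :: rest)

-- cur = cur if the stack is empty else min(cur, ndp[stack[-1]])
def bSel (ndp : List Int) (pr : Int × List Int) : Int :=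
  match pr.2 with
  | [] => pr.1
  | t :: _ => min pr.1 (PySem.List.pyGetD ndp t 0)

def minDifficulty1_alt (jobDifficulty : List Int) (d : Int) : Int :=
  let n : Int := PySem.List.len jobDifficulty
  if d > n then -1
  else
    let st := jobDifficulty.foldl (fun (p : List Int × Int) x =>
        let run := max p.2 x
        (p.1 ++ [run], run)) (([] : List Int), PySem.List.pyGetD jobDifficulty 0 0)
    let dp := st.1
    let dp := (PySem.List.pyRange 1 d 1).foldl (fun dpPrev l =>
        let r := (PySem.List.pyRange l n 1).foldl
          (fun (q : List Int × List Int) i =>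
            let cur0 := PySem.List.pyGetD dpPrev (i - 1) 0 + PySem.List.pyGetD jobDifficulty i 0
            let pr := bPop jobDifficulty (PySem.List.pyGetD jobDifficulty i 0) q.1 q.2 cur0
            let cur := bSel q.1 pr
            (PySem.List.pySetD q.1 i cur, i :: pr.2))
          (PySem.List.pyRepeat [(0 : Int)] n, ([] : List Int))
        r.1) dp
    PySem.List.pyGetD dp (n - 1) 0

-- ===== PRECONDITION & SPEC =====
-- Pre_ excludes exactly the inputs on which A raises IndexError: the empty job list and d ≤ 0.
def Pre_minDifficulty1 (jobDifficulty : List Int) (d : Int) : Prop :=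
  jobDifficulty ≠ [] ∧ 1 ≤ d
instance (jobDifficulty : List Int) (d : Int) : Decidable (Pre_minDifficulty1 jobDifficulty d) := by
  unfold Pre_minDifficulty1; infer_instance

def pvWitness_minDifficulty1 : List Int × Int := ([6, 5, 4, 3, 2, 1], 2)

def Spec_minDifficulty1 (jobDifficulty : List Int) (d : Int) (out : Int) : Prop := out = minDifficulty1_alt jobDifficulty d
instance (jobDifficulty : List Int) (d : Int) (out : Int) : Decidable (Spec_minDifficulty1 jobDifficulty d out) := by unfold Spec_minDifficulty1; infer_instance

-- ===== CLAIM (what is proved, stated in full; the proofs are below) =====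
def Claim_equal_minDifficulty1 : Prop := ∀ (jobDifficulty : List Int) (d : Int), Dom_minDifficulty1 jobDifficulty d → Pre_minDifficulty1 jobDifficulty d → Spec_minDifficulty1 jobDifficulty d (minDifficulty1 jobDifficulty d)

-- ===== LEMMAS AND PROOFS =====

-- reference values: pvPm = prefix maximum, pvSm = segment maximum, pvDpF = the dp recurrence
def pvPm (jd : List Int) : Nat → Int
  | 0 => jd.getD 0 0
  | i+1 => max (pvPm jd i) (jd.getD (i+1) 0)

def pvSmAux (jd : List Int) (a : Nat) : Nat → Int
  | 0 => jd.getD a 0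
  | k+1 => max (pvSmAux jd a k) (jd.getD (a+k+1) 0)

def pvSm (jd : List Int) (a b : Nat) : Int := pvSmAux jd a (b - a)

def pvDpF (jd : List Int) : Nat → Nat → Option Int
  | 0, i => some (pvPm jd i)
  | c+1, i => (List.range' c (i - c)).foldl
      (fun acc j => ominO acc (oaddI (pvDpF jd c j) (pvSm jd (j+1) i))) none

-- the common final value
def pvE (jd : List Int) (d : Int) : Int :=
  match pvDpF jd (d.toNat - 1) (jd.length - 1) with
  | none => -1
  | some v => v

-- candidate list for the transition into (i, c+1), split points a..i-1
def pvCl (jd : List Int) (c a i : Nat) : List Int :=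
  (List.range' a (i - a)).map (fun j => ((pvDpF jd c j).getD 0) + pvSm jd (j+1) i)

-- ---- small utilities ----
lemma getD_set_self (l : List Int) (i : Nat) (a b : Int) (h : i < l.length) :
    (l.set i a).getD i b = a := by simp [List.getD, h]

lemma getD_set_ne (l : List Int) (i j : Nat) (a b : Int) (h : i ≠ j) :
    (l.set i a).getD j b = l.getD j b := by simp [List.getD, List.getElem?_set_ne h]

lemma getDO_set_self (l : List (Option Int)) (i : Nat) (a b : Option Int) (h : i < l.length) :
    (l.set i a).getD i b = a := by simp [List.getD, h]

lemma getDO_set_ne (l : List (Option Int)) (i j : Nat) (a b : Option Int) (h : i ≠ j) :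
    (l.set i a).getD j b = l.getD j b := by simp [List.getD, List.getElem?_set_ne h]

lemma getDL_set_self {α : Type} (l : List (List α)) (i : Nat) (a b : List α) (h : i < l.length) :
    (l.set i a).getD i b = a := by simp [List.getD, h]

lemma getDL_set_ne {α : Type} (l : List (List α)) (i j : Nat) (a b : List α) (h : i ≠ j) :
    (l.set i a).getD j b = l.getD j b := by simp [List.getD, List.getElem?_set_ne h]

lemma pyRange_natCast (a b : Nat) :
    PySem.List.pyRange (a : Int) (b : Int) 1 = (List.range' a (b - a)).map (fun k : Nat => (k : Int)) := by
  rw [PySem.List.pyRange_one, List.range'_eq_map_range, List.map_map]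
  have : ((b : Int) - (a : Int)).toNat = b - a := by omega
  rw [this]
  apply List.map_congr_left
  intro k _
  simp

lemma range'_foldl_inv {σ : Type} (P : Nat → σ → Prop) (f : σ → Nat → σ) :
    ∀ (len a : Nat) (s : σ), P a s →
      (∀ j t, a ≤ j → j < a + len → P j t → P (j+1) (f t j)) →
      P (a + len) ((List.range' a len).foldl f s) := by
  intro len
  induction len with
  | zero => intro a s h _; simpa using h
  | succ k ih =>
    intro a s h hstep
    rw [List.range'_succ, List.foldl_cons]
    have := ih (a+1) (f s a) (hstep a s (le_refl a) (by omega) h)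
      (fun j t hj hj2 ht => hstep j t (by omega) (by omega) ht)
    have heq : a + (k+1) = (a+1) + k := by omega
    rw [heq]; exact this

-- ---- pvPm / pvSm facts ----
lemma pvPm_append (jd t : List Int) : ∀ k, k < jd.length → pvPm (jd ++ t) k = pvPm jd k := by
  intro k
  induction k with
  | zero => intro h; simp [pvPm, List.getD, List.getElem?_append_left h]
  | succ k ih =>
    intro h
    simp only [pvPm]
    rw [ih (by omega)]
    congr 1
    simp [List.getD, List.getElem?_append_left h]

lemma pvSm_self (jd : List Int) (a : Nat) : pvSm jd a a = jd.getD a 0 := by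
  simp [pvSm, pvSmAux]

lemma pvSm_succ (jd : List Int) (a b : Nat) (h : a ≤ b) :
    pvSm jd a (b+1) = max (pvSm jd a b) (jd.getD (b+1) 0) := by
  unfold pvSm
  have h1 : b + 1 - a = (b - a) + 1 := by omega
  rw [h1]
  simp only [pvSmAux]
  have : a + (b - a) + 1 = b + 1 := by omega
  rw [this]

lemma pvSm_ge_right (jd : List Int) (a b : Nat) (h : a ≤ b) :
    jd.getD b 0 ≤ pvSm jd a b := by
  rcases Nat.eq_or_lt_of_le h with he | hlt
  · rw [← he, pvSm_self]
  · obtain ⟨m, rfl⟩ : ∃ m, b = m + 1 := ⟨b - 1, by omega⟩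
    rw [pvSm_succ jd a m (by omega)]
    exact le_max_right _ _

lemma pvSm_concat (jd : List Int) : ∀ (k a s : Nat), a ≤ s →
    pvSm jd a (s + 1 + k) = max (pvSm jd a s) (pvSm jd (s+1) (s + 1 + k)) := by
  intro k
  induction k with
  | zero =>
    intro a s h
    rw [pvSm_succ jd a s h]
    have : s + 1 + 0 = s + 1 := by omega
    rw [this, pvSm_self]
  | succ k ih =>
    intro a s h
    have e1 : s + 1 + (k + 1) = (s + 1 + k) + 1 := by omega
    rw [e1, pvSm_succ jd a (s+1+k) (by omega), ih a s h,
        pvSm_succ jd (s+1) (s+1+k) (by omega), max_assoc]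

lemma pvSm_split (jd : List Int) (a s b : Nat) (h1 : a ≤ s) (h2 : s < b) :
    pvSm jd a b = max (pvSm jd a s) (pvSm jd (s+1) b) := by
  obtain ⟨k, rfl⟩ : ∃ k, b = s + 1 + k := ⟨b - s - 1, by omega⟩
  exact pvSm_concat jd k a s h1

lemma pvSm_mono_left (jd : List Int) (a j b : Nat) (h1 : a ≤ j) (h2 : j < b) :
    pvSm jd (j+1) b ≤ pvSm jd (a+1) b := by
  rcases Nat.eq_or_lt_of_le h1 with he | hlt
  · rw [he]
  · rw [pvSm_split jd (a+1) j b (by omega) h2]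
    exact le_max_right _ _

-- ---- pvDpF facts ----
lemma pvDpF_none (jd : List Int) (c i : Nat) (h : i < c) : pvDpF jd c i = none := by
  match c with
  | c'+1 =>
    have : i - c' = 0 := by omega
    simp [pvDpF, this]

lemma foldl_ominO_some (F : Nat → Option Int) (g : Nat → Int) :
    ∀ (js : List Nat) (a : Int), (∀ j ∈ js, F j = some (g j)) →
      js.foldl (fun acc j => ominO acc (F j)) (some a)
        = some (js.foldl (fun x j => min x (g j)) a) := by
  intro js
  induction js with
  | nil => intro a _; rfl
  | cons j js ih =>
    intro a h
    rw [List.foldl_cons, h j (by simp)]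
    have h0 : ominO (some a) (some (g j)) = some (min a (g j)) := rfl
    rw [h0, ih (min a (g j)) (fun x hx => h x (by simp [hx])), List.foldl_cons]

lemma foldl_min_eq_foldl_min_map (g : Nat → Int) (js : List Nat) (a : Int) :
    js.foldl (fun x j => min x (g j)) a = (js.map g).foldl min a := by
  rw [List.foldl_map]

lemma foldl_ominO_none (F : Nat → Option Int) (g : Nat → Int) (js : List Nat)
    (h : ∀ j ∈ js, F j = some (g j)) :
    js.foldl (fun acc j => ominO acc (F j)) none = (js.map g).min? := by
  cases js with
  | nil => rfl
  | cons j js =>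
    rw [List.foldl_cons]
    have h0 : ominO none (F j) = some (g j) := by rw [h j (by simp)]; rfl
    rw [h0, foldl_ominO_some F g js (g j) (fun x hx => h x (by simp [hx]))]
    rw [List.map_cons, List.min?_cons', foldl_min_eq_foldl_min_map]

lemma pvDpF_some (jd : List Int) : ∀ (c i : Nat), c ≤ i → ∃ v, pvDpF jd c i = some v := by
  intro c
  induction c with
  | zero => intro i _; exact ⟨pvPm jd i, rfl⟩
  | succ c ih =>
    intro i hi
    have hlen : i - c = (i - c - 1) + 1 := by omega
    obtain ⟨v, hv⟩ := ih c (le_refl c)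
    simp only [pvDpF]
    rw [hlen, List.range'_succ, List.foldl_cons]
    have h0 : ominO none (oaddI (pvDpF jd c c) (pvSm jd (c+1) i)) = some (v + pvSm jd (c+1) i) := by
      rw [hv]; rfl
    rw [h0]
    have : ∀ (js : List Nat) (x : Int),
        ∃ w, js.foldl (fun acc j => ominO acc (oaddI (pvDpF jd c j) (pvSm jd (j+1) i))) (some x) = some w := by
      intro js
      induction js with
      | nil => intro x; exact ⟨x, rfl⟩
      | cons j js ihj =>
        intro x
        rw [List.foldl_cons]
        cases hj : pvDpF jd c j with
        | none => exact ihj x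
        | some y =>
          have : ominO (some x) (oaddI (some y) (pvSm jd (j+1) i)) = some (min x (y + pvSm jd (j+1) i)) := rfl
          rw [this]; exact ihj _
    exact this _ _

lemma pvDpF_succ_eq_min? (jd : List Int) (c i : Nat) :
    pvDpF jd (c+1) i = (pvCl jd c c i).min? := by
  simp only [pvDpF, pvCl]
  apply foldl_ominO_none
  intro j hj
  have hcj : c ≤ j := by
    rw [List.mem_range'] at hj; omega
  obtain ⟨v, hv⟩ := pvDpF_some jd c j hcj
  rw [hv]; simp [oaddI]

-- ---- min? facts ----
lemma foldl_min_le_init : ∀ (xs : List Int) (a : Int), xs.foldl min a ≤ a := by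
  intro xs
  induction xs with
  | nil => intro a; exact le_refl a
  | cons y ys ih =>
    intro a
    rw [List.foldl_cons]
    exact le_trans (ih (min a y)) (min_le_left _ _)

lemma foldl_min_le_mem : ∀ (xs : List Int) (a x : Int), x ∈ xs → xs.foldl min a ≤ x := by
  intro xs
  induction xs with
  | nil => intro a x hx; simp at hx
  | cons y ys ih =>
    intro a x hx
    rw [List.foldl_cons]
    rcases List.mem_cons.mp hx with rfl | hmem
    · exact le_trans (foldl_min_le_init ys (min a x)) (min_le_right _ _)
    · exact ih (min a y) x hmem

lemma foldl_min_cases : ∀ (xs : List Int) (a : Int), xs.foldl min a = a ∨ xs.foldl min a ∈ xs := by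
  intro xs
  induction xs with
  | nil => intro a; left; rfl
  | cons y ys ih =>
    intro a
    rw [List.foldl_cons]
    rcases ih (min a y) with h | h
    · rw [h]
      rcases min_choice a y with h2 | h2
      · left; exact h2
      · right; rw [h2]; simp
    · right; simp [h]

lemma minq_le (L : List Int) (v x : Int) (h : L.min? = some v) (hx : x ∈ L) : v ≤ x := by
  cases L with
  | nil => simp at h
  | cons y ys =>
    rw [List.min?_cons'] at h
    rw [← Option.some_inj.mp h]
    rcases List.mem_cons.mp hx with rfl | hmem
    · exact foldl_min_le_init ys x
    · exact foldl_min_le_mem ys y x hmem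

lemma minq_mem (L : List Int) (v : Int) (h : L.min? = some v) : v ∈ L := by
  cases L with
  | nil => simp at h
  | cons y ys =>
    rw [List.min?_cons'] at h
    rw [← Option.some_inj.mp h]
    rcases foldl_min_cases ys y with h2 | h2
    · rw [h2]; simp
    · simp [h2]

-- ---- candidate-list facts ----
lemma Tc_mem_pvCl (jd : List Int) (c a i j : Nat) (h1 : a ≤ j) (h2 : j < i) :
    ((pvDpF jd c j).getD 0) + pvSm jd (j+1) i ∈ pvCl jd c a i := by
  unfold pvCl
  refine List.mem_map.mpr ⟨j, List.mem_range'.mpr ⟨j - a, by omega, by omega⟩, rfl⟩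

lemma pvCl_mem_elim (jd : List Int) (c a i : Nat) (x : Int) (hai : a ≤ i)
    (hx : x ∈ pvCl jd c a i) :
    ∃ j, a ≤ j ∧ j < i ∧ x = ((pvDpF jd c j).getD 0) + pvSm jd (j+1) i := by
  unfold pvCl at hx
  obtain ⟨j, hj, rfl⟩ := List.mem_map.mp hx
  obtain ⟨k, hk, hjk⟩ := List.mem_range'.mp hj
  exact ⟨j, by omega, by omega, rfl⟩

-- ---- B-side: day 1 ----
lemma b_day1 (jd : List Int) (h : jd ≠ []) :
    jd.foldl (fun (p : List Int × Int) x => (p.1 ++ [max p.2 x], max p.2 x))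
      (([] : List Int), jd.getD 0 0)
    = ((List.range jd.length).map (pvPm jd), pvPm jd (jd.length - 1)) := by
  induction jd using List.reverseRecOn with
  | nil => simp at h
  | append_singleton t x ih =>
    by_cases ht : t = []
    · subst ht
      simp [pvPm, List.getD]
    · have hlen : 0 < t.length := List.length_pos_iff.mpr ht
      have hinit : (t ++ [x]).getD 0 0 = t.getD 0 0 := by
        rw [List.getD_eq_getElem?_getD, List.getD_eq_getElem?_getD, List.getElem?_append_left hlen]
      rw [List.foldl_append, hinit, ih ht, List.foldl_cons, List.foldl_nil]
      have hlast : (t ++ [x]).getD t.length 0 = x := by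
        rw [List.getD_eq_getElem?_getD, List.getElem?_append_right (le_refl t.length)]
        simp
      have hmap : (List.range t.length).map (pvPm (t ++ [x])) = (List.range t.length).map (pvPm t) := by
        apply List.map_congr_left
        intro k hk
        exact pvPm_append t [x] k (List.mem_range.mp hk)
      have hlen2 : (t ++ [x]).length = t.length + 1 := by simp
      have hpm : pvPm (t ++ [x]) t.length = max (pvPm t (t.length - 1)) x := by
        obtain ⟨m, hm⟩ : ∃ m, t.length = m + 1 := ⟨t.length - 1, by omega⟩
        rw [hm]
        simp only [pvPm]
        rw [pvPm_append t [x] m (by omega)]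
        have : t.length - 1 = m := by omega
        rw [this] at *
        congr 1
        rw [← hm, hlast]
      rw [hlen2, List.range_succ, List.map_append, hmap, List.map_singleton]
      have h10 : t.length + 1 - 1 = t.length := by omega
      rw [h10]
      simp [hpm]

-- ---- B-side: the monotonic stack ----
-- stack invariant (stack top-first; lo = l - 1 is the lowest legal split point):
-- the indices increase downwards, each gap's segment max is attained at the stack
-- element closing it, and difficulties strictly decrease towards the top
def StkInv (jd : List Int) (lo : Nat) : List Nat → Prop
  | [] => True
  | s :: rest => rest.headD lo < s ∧
      pvSm jd (rest.headD lo + 1) s = jd.getD s 0 ∧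
      (∀ u ∈ rest, jd.getD s 0 < jd.getD u 0) ∧
      StkInv jd lo rest

lemma bPop_spec (jd ndp : List Int) (lo i : Nat) (v : Int)
    (hvi : (pvCl jd lo lo i).min? = some v) :
    ∀ (sN : List Nat) (cur : Int),
      StkInv jd lo sN →
      (∀ u ∈ sN, lo < u ∧ u < i) →
      (∀ u ∈ sN, some (ndp.getD u 0) = pvDpF jd (lo+1) u) →
      pvSm jd (sN.headD lo + 1) i = jd.getD i 0 →
      v ≤ cur →
      (∀ j, sN.headD lo ≤ j → j < i → cur ≤ ((pvDpF jd lo j).getD 0) + jd.getD i 0) →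
      ∃ (cur' : Int) (sN' : List Nat),
        bPop jd (jd.getD i 0) ndp (sN.map (fun k : Nat => (k : Int))) cur
          = (cur', sN'.map (fun k : Nat => (k : Int))) ∧
        StkInv jd lo sN' ∧
        (∀ u ∈ sN', lo < u ∧ u < i) ∧
        (∀ u ∈ sN', jd.getD i 0 < jd.getD u 0) ∧
        (∀ u ∈ sN', some (ndp.getD u 0) = pvDpF jd (lo+1) u) ∧
        pvSm jd (sN'.headD lo + 1) i = jd.getD i 0 ∧
        v ≤ cur' ∧
        (∀ j, sN'.headD lo ≤ j → j < i → cur' ≤ ((pvDpF jd lo j).getD 0) + jd.getD i 0) := by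
  intro sN
  induction sN with
  | nil =>
    intro cur _ _ _ hreg hvc hcov
    exact ⟨cur, [], by simp [bPop], trivial, by simp, by simp, by simp, hreg, hvc, hcov⟩
  | cons s rest ih =>
    intro cur hstk hbnd hnd hreg hvc hcov
    obtain ⟨hh1, hh2, hh3, hstk'⟩ := hstk
    obtain ⟨hs1, hs2⟩ := hbnd s (by simp)
    have hregS : pvSm jd (s + 1) i = jd.getD i 0 := by
      simpa using hreg
    have hlor : lo ≤ rest.headD lo := by
      cases rest with
      | nil => simp
      | cons r rs => exact le_of_lt (hbnd r (by simp)).1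
    by_cases hpop : jd.getD s 0 ≤ jd.getD i 0
    · -- pop s
      set cur' := min cur (ndp.getD s 0 - jd.getD s 0 + jd.getD i 0) with hcur'
      have hstep : bPop jd (jd.getD i 0) ndp ((s :: rest).map (fun k : Nat => (k : Int))) cur
          = bPop jd (jd.getD i 0) ndp (rest.map (fun k : Nat => (k : Int))) cur' := by
        simp only [List.map_cons, bPop, PySem.List.pyGetD_natCast]
        rw [if_pos hpop]
      have hreg' : pvSm jd (rest.headD lo + 1) i = jd.getD i 0 := by
        rw [pvSm_split jd (rest.headD lo + 1) s i (by omega) hs2, hh2, hregS]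
        exact max_eq_right hpop
      have hw' : (pvCl jd lo lo s).min? = some (ndp.getD s 0) := by
        rw [← pvDpF_succ_eq_min?, ← hnd s (by simp)]
      obtain ⟨js, hj1, hj2, hj3⟩ := pvCl_mem_elim jd lo lo s (ndp.getD s 0)
        (le_of_lt hs1) (minq_mem _ _ hw')
      have hvc' : v ≤ cur' := by
        have hTc : v ≤ ((pvDpF jd lo js).getD 0) + pvSm jd (js+1) i :=
          minq_le _ v _ hvi (Tc_mem_pvCl jd lo lo i js hj1 (by omega))
        have hsplit : pvSm jd (js+1) i = max (pvSm jd (js+1) s) (jd.getD i 0) := by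
          rw [pvSm_split jd (js+1) s i (by omega) hs2, hregS]
        have hgr : jd.getD s 0 ≤ pvSm jd (js+1) s := pvSm_ge_right jd (js+1) s (by omega)
        have hmaxle : pvSm jd (js+1) i ≤ pvSm jd (js+1) s - jd.getD s 0 + jd.getD i 0 := by
          rw [hsplit]
          exact max_le (by omega) (by omega)
        have : v ≤ ndp.getD s 0 - jd.getD s 0 + jd.getD i 0 := by omega
        exact le_min hvc this
      have hcov' : ∀ j, rest.headD lo ≤ j → j < i →
          cur' ≤ ((pvDpF jd lo j).getD 0) + jd.getD i 0 := by
        intro j hjl hji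
        by_cases hjs : s ≤ j
        · exact le_trans (min_le_left _ _) (hcov j (by simpa using hjs) hji)
        · have hjs' : j < s := by omega
          have hwle : ndp.getD s 0 ≤ ((pvDpF jd lo j).getD 0) + pvSm jd (j+1) s :=
            minq_le _ _ _ hw' (Tc_mem_pvCl jd lo lo s j (by omega) hjs')
          have hmono : pvSm jd (j+1) s ≤ pvSm jd (rest.headD lo + 1) s := by
            have := pvSm_mono_left jd (rest.headD lo) j s hjl hjs'
            exact this
          have hmin : cur' ≤ ndp.getD s 0 - jd.getD s 0 + jd.getD i 0 := min_le_right _ _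
          rw [hh2] at hmono
          omega
      obtain ⟨cur'', sN', heq, p1, p2, p3, p4, p5, p6, p7⟩ :=
        ih cur' hstk' (fun u hu => hbnd u (by simp [hu]))
          (fun u hu => hnd u (by simp [hu])) hreg' hvc' hcov'
      exact ⟨cur'', sN', by rw [hstep]; exact heq, p1, p2, p3, p4, p5, p6, p7⟩
    · -- keep s
      have hstep : bPop jd (jd.getD i 0) ndp ((s :: rest).map (fun k : Nat => (k : Int))) cur
          = (cur, (s :: rest).map (fun k : Nat => (k : Int))) := by
        simp only [List.map_cons, bPop, PySem.List.pyGetD_natCast]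
        rw [if_neg hpop]
      refine ⟨cur, s :: rest, hstep, ⟨hh1, hh2, hh3, hstk'⟩, hbnd, ?_, hnd, by simpa using hreg, hvc, by simpa using hcov⟩
      intro u hu
      rcases List.mem_cons.mp hu with rfl | hmem
      · omega
      · exact lt_trans (by omega) (hh3 u hmem)

-- the step function of the inner (per-day) loop, written out once
def bStep (jd prev : List Int) (q : List Int × List Int) (i : Int) : List Int × List Int :=
  (PySem.List.pySetD q.1 i
      (bSel q.1 (bPop jd (PySem.List.pyGetD jd i 0) q.1 q.2
          (PySem.List.pyGetD prev (i - 1) 0 + PySem.List.pyGetD jd i 0))),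
   i :: (bPop jd (PySem.List.pyGetD jd i 0) q.1 q.2
      (PySem.List.pyGetD prev (i - 1) 0 + PySem.List.pyGetD jd i 0)).2)

-- one full day transition by the stack pass
lemma b_day (jd prev : List Int) (lo : Nat)
    (hn : lo + 1 ≤ jd.length)
    (Hprev : ∀ j, lo ≤ j → j < jd.length → some (prev.getD j 0) = pvDpF jd lo j) :
    ∀ res, res =
      ((PySem.List.pyRange ((lo + 1 : Nat) : Int) ((jd.length : Nat) : Int) 1).foldl
        (bStep jd prev)
        (PySem.List.pyRepeat [(0 : Int)] ((jd.length : Nat) : Int), ([] : List Int))).1 →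
      res.length = jd.length ∧
      ∀ r, lo + 1 ≤ r → r < jd.length → some (res.getD r 0) = pvDpF jd (lo+1) r := by
  intro res hres
  have hr : PySem.List.pyRange ((lo + 1 : Nat) : Int) ((jd.length : Nat) : Int) 1
      = (List.range' (lo+1) (jd.length - (lo+1))).map (fun k : Nat => (k : Int)) :=
    pyRange_natCast (lo+1) jd.length
  have hrepl : PySem.List.pyRepeat [(0 : Int)] ((jd.length : Nat) : Int)
      = List.replicate jd.length 0 := by
    rw [PySem.List.pyRepeat_singleton, Int.toNat_natCast]
  rw [hr, List.foldl_map, hrepl] at hres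
  have key := range'_foldl_inv
    (P := fun b (q : List Int × List Int) =>
      ∃ sN : List Nat,
        q.2 = sN.map (fun k : Nat => (k : Int)) ∧
        StkInv jd lo sN ∧
        (∀ u ∈ sN, lo < u ∧ u < b) ∧
        sN.headD lo = b - 1 ∧
        q.1.length = jd.length ∧
        (∀ r, lo + 1 ≤ r → r < b → some (q.1.getD r 0) = pvDpF jd (lo+1) r))
    (f := fun q (iN : Nat) => bStep jd prev q ((iN : Nat) : Int))
    (jd.length - (lo+1)) (lo+1) (List.replicate jd.length 0, ([] : List Int))
    ?hinit ?hstep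
  case hinit =>
    exact ⟨[], rfl, trivial, by simp, by simp, by simp, by omega⟩
  case hstep =>
    intro iN q hi1 hi2 hP
    beta_reduce
    obtain ⟨sN, hq2, hstk, hbnd, hhd, hlen, hout⟩ := hP
    have hiN : iN < jd.length := by omega
    have hlo : lo < iN := by omega
    have hc1 : ((iN : Nat) : Int) - 1 = ((iN - 1 : Nat) : Int) := by omega
    obtain ⟨v, hv⟩ := pvDpF_some jd (lo+1) iN (by omega)
    have hvi : (pvCl jd lo lo iN).min? = some v := by
      rw [← pvDpF_succ_eq_min?]; exact hv
    have hpv : prev.getD (iN-1) 0 = (pvDpF jd lo (iN-1)).getD 0 := by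
      rw [← Hprev (iN-1) (by omega) (by omega)]
      rfl
    have hvc0 : v ≤ prev.getD (iN-1) 0 + jd.getD iN 0 := by
      have hmem := Tc_mem_pvCl jd lo lo iN (iN-1) (by omega) (by omega)
      have := minq_le _ v _ hvi hmem
      have e : (iN - 1) + 1 = iN := by omega
      rw [e, pvSm_self, ← hpv] at this
      exact this
    have hreg0 : pvSm jd (sN.headD lo + 1) iN = jd.getD iN 0 := by
      rw [hhd]
      have e : (iN - 1) + 1 = iN := by omega
      rw [e, pvSm_self]
    have hcov0 : ∀ j, sN.headD lo ≤ j → j < iN →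
        prev.getD (iN-1) 0 + jd.getD iN 0 ≤ ((pvDpF jd lo j).getD 0) + jd.getD iN 0 := by
      intro j hj1 hj2
      rw [hhd] at hj1
      have : j = iN - 1 := by omega
      subst this
      rw [hpv]
    obtain ⟨cur', sN', heq, p1, p2, p3, p4, p5, p6, p7⟩ :=
      bPop_spec jd q.1 lo iN v hvi sN (prev.getD (iN-1) 0 + jd.getD iN 0)
        hstk (fun u hu => hbnd u hu) (fun u hu => hout u (by have := hbnd u hu; omega) (hbnd u hu).2)
        hreg0 hvc0 hcov0
    obtain ⟨j0, hj0a, hj0b, hj0e⟩ :=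
      pvCl_mem_elim jd lo lo iN v (le_of_lt hlo) (minq_mem _ _ hvi)
    show ∃ sNg : List Nat, (bStep jd prev q ((iN : Nat) : Int)).2 = _ ∧ _
    cases sN' with
    | nil =>
      have hbs : bStep jd prev q ((iN : Nat) : Int)
          = (q.1.set iN cur', ((iN :: []) : List Nat).map (fun k : Nat => (k : Int))) := by
        unfold bStep
        rw [hc1]
        simp only [PySem.List.pyGetD_natCast, PySem.List.pySetD_natCast]
        rw [hq2, heq]
        simp [bSel]
      have hle : cur' ≤ v := by
        have hco := p7 j0 (by simpa using hj0a) hj0b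
        have hsm : pvSm jd (j0+1) iN = jd.getD iN 0 := by
          have h1 : pvSm jd (j0+1) iN ≤ pvSm jd (lo+1) iN := pvSm_mono_left jd lo j0 iN hj0a hj0b
          have h2 : jd.getD iN 0 ≤ pvSm jd (j0+1) iN := pvSm_ge_right jd (j0+1) iN (by omega)
          have h3 : pvSm jd (lo+1) iN = jd.getD iN 0 := by simpa using p5
          omega
        rw [hj0e, hsm]
        exact hco
      have hcurv : cur' = v := le_antisymm hle p6
      refine ⟨iN :: [], by rw [hbs], ?_, ?_, by simp, ?_, ?_⟩
      · exact ⟨by simpa using hlo, by simpa using p5, by simp, trivial⟩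
      · intro u hu
        rcases List.mem_cons.mp hu with rfl | hm
        · exact ⟨hlo, by omega⟩
        · simp at hm
      · rw [hbs]
        simp [List.length_set, hlen]
      · intro r hr1 hr2
        rw [hbs]
        by_cases hri : r = iN
        · subst hri
          show some ((q.1.set r cur').getD r 0) = _
          rw [getD_set_self _ _ _ _ (by omega), hcurv]
          exact hv.symm
        · show some ((q.1.set iN cur').getD r 0) = _
          rw [getD_set_ne _ _ _ _ _ (fun h => hri h.symm)]
          exact hout r hr1 (by omega)
    | cons tN rest' =>
      obtain ⟨ht1, ht2⟩ := p2 tN (by simp)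
      have hbs : bStep jd prev q ((iN : Nat) : Int)
          = (q.1.set iN (min cur' (q.1.getD tN 0)),
             ((iN :: tN :: rest') : List Nat).map (fun k : Nat => (k : Int))) := by
        unfold bStep
        rw [hc1]
        simp only [PySem.List.pyGetD_natCast, PySem.List.pySetD_natCast]
        rw [hq2, heq]
        simp [bSel]
      have hw : (pvCl jd lo lo tN).min? = some (q.1.getD tN 0) := by
        rw [← pvDpF_succ_eq_min?, ← hout tN (by omega) ht2]
      have hatn : jd.getD iN 0 < jd.getD tN 0 := p3 tN (by simp)
      have hregT : pvSm jd (tN+1) iN = jd.getD iN 0 := by simpa using p5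
      have hcollapse : ∀ j, lo ≤ j → j < tN →
          pvSm jd (j+1) iN = pvSm jd (j+1) tN := by
        intro j hj1 hj2
        rw [pvSm_split jd (j+1) tN iN (by omega) ht2, hregT]
        have : jd.getD tN 0 ≤ pvSm jd (j+1) tN := pvSm_ge_right jd (j+1) tN (by omega)
        omega
      have hvlew : v ≤ q.1.getD tN 0 := by
        obtain ⟨js, hjs1, hjs2, hjs3⟩ :=
          pvCl_mem_elim jd lo lo tN (q.1.getD tN 0) (le_of_lt ht1) (minq_mem _ _ hw)
        have := minq_le _ v _ hvi (Tc_mem_pvCl jd lo lo iN js hjs1 (by omega))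
        rw [hcollapse js hjs1 hjs2, ← hjs3] at this
        exact this
      have hle : min cur' (q.1.getD tN 0) ≤ v := by
        by_cases hjt : j0 < tN
        · have hwle := minq_le _ _ _ hw (Tc_mem_pvCl jd lo lo tN j0 hj0a hjt)
          have : v = ((pvDpF jd lo j0).getD 0) + pvSm jd (j0+1) tN := by
            rw [hj0e, hcollapse j0 hj0a hjt]
          have hmc : min cur' (q.1.getD tN 0) ≤ q.1.getD tN 0 := min_le_right _ _
          omega
        · have hco := p7 j0 (by simpa using (by omega : tN ≤ j0)) hj0b
          have hsm : pvSm jd (j0+1) iN = jd.getD iN 0 := by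
            have h1 : pvSm jd (j0+1) iN ≤ pvSm jd (tN+1) iN :=
              pvSm_mono_left jd tN j0 iN (by omega) hj0b
            have h2 : jd.getD iN 0 ≤ pvSm jd (j0+1) iN := pvSm_ge_right jd (j0+1) iN (by omega)
            omega
          have : v = ((pvDpF jd lo j0).getD 0) + jd.getD iN 0 := by rw [hj0e, hsm]
          have hmc : min cur' (q.1.getD tN 0) ≤ cur' := min_le_left _ _
          omega
      have hcurv : min cur' (q.1.getD tN 0) = v := le_antisymm hle (le_min p6 hvlew)
      refine ⟨iN :: tN :: rest', by rw [hbs], ?_, ?_, by simp, ?_, ?_⟩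
      · exact ⟨by simpa using ht2, by simpa using p5, p3, p1⟩
      · intro u hu
        rcases List.mem_cons.mp hu with rfl | hm
        · exact ⟨hlo, by omega⟩
        · have := p2 u hm
          omega
      · rw [hbs]
        simp [List.length_set, hlen]
      · intro r hr1 hr2
        rw [hbs]
        by_cases hri : r = iN
        · subst hri
          show some ((q.1.set r (min cur' (q.1.getD tN 0))).getD r 0) = _
          rw [getD_set_self _ _ _ _ (by omega), hcurv]
          exact hv.symm
        · show some ((q.1.set iN (min cur' (q.1.getD tN 0))).getD r 0) = _
          rw [getD_set_ne _ _ _ _ _ (fun h => hri h.symm)]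
          exact hout r hr1 (by omega)
  have hfin : (lo + 1) + (jd.length - (lo+1)) = jd.length := by omega
  rw [hfin] at key
  obtain ⟨sNf, _, _, _, _, hlenf, houtf⟩ := key
  rw [hres]
  exact ⟨hlenf, houtf⟩

-- the outer loop over days
lemma b_outer (jd : List Int) (D : Nat) (hD1 : 1 ≤ D) (hDN : D ≤ jd.length) :
    ∀ res : List Int, res =
      (PySem.List.pyRange 1 (D : Int) 1).foldl (fun dpPrev l =>
        ((PySem.List.pyRange l ((jd.length : Nat) : Int) 1).foldl
          (bStep jd dpPrev)
          (PySem.List.pyRepeat [(0 : Int)] ((jd.length : Nat) : Int), ([] : List Int))).1)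
      ((List.range jd.length).map (pvPm jd)) →
    res.length = jd.length ∧ ∀ iN, D - 1 ≤ iN → iN < jd.length → some (res.getD iN 0) = pvDpF jd (D - 1) iN := by
  intro res hres
  have hr : PySem.List.pyRange 1 (D : Int) 1
      = (List.range' 1 (D - 1)).map (fun k : Nat => (k : Int)) := by
    have h := pyRange_natCast 1 D
    simpa using h
  rw [hr, List.foldl_map] at hres
  have key := range'_foldl_inv
    (P := fun l dp => dp.length = jd.length ∧
      ∀ r, l - 1 ≤ r → r < jd.length → some (dp.getD r 0) = pvDpF jd (l - 1) r)
    (f := fun dp (lN : Nat) =>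
      ((PySem.List.pyRange ((lN : Nat) : Int) ((jd.length : Nat) : Int) 1).foldl
        (bStep jd dp)
        (PySem.List.pyRepeat [(0 : Int)] ((jd.length : Nat) : Int), ([] : List Int))).1)
    (D - 1) 1 ((List.range jd.length).map (pvPm jd)) ?hinit ?hstep
  case hinit =>
    constructor
    · simp
    · intro r _ hr2
      have hg : ((List.range jd.length).map (pvPm jd)).getD r 0 = pvPm jd r := by
        rw [List.getD_eq_getElem?_getD, List.getElem?_map, List.getElem?_range hr2]
        rfl
      rw [hg]
      rfl
  case hstep =>
    intro lN dp hl1 hlD hP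
    have hlo : lN - 1 + 1 = lN := by omega
    have hday := b_day jd dp (lN - 1) (by omega) (fun j hj1 hj2 => hP.2 j hj1 hj2) _ rfl
    rw [hlo] at hday
    constructor
    · exact hday.1
    · intro r hr1 hr2
      have e : lN + 1 - 1 = lN := by omega
      rw [e]
      exact hday.2 r (by omega) hr2
  have hfin : 1 + (D - 1) = D := by omega
  rw [hfin] at key
  rw [hres]
  exact ⟨key.1, fun iN h1 h2 => key.2 iN h1 h2⟩

lemma B_eq (jd : List Int) (d : Int) (hne : jd ≠ []) (hd : 1 ≤ d) :
    minDifficulty1_alt jd d = pvE jd d := by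
  obtain ⟨D, rfl⟩ : ∃ D : Nat, d = (D : Int) := ⟨d.toNat, by omega⟩
  have hD1 : 1 ≤ D := by exact_mod_cast hd
  have hN1 : 1 ≤ jd.length := List.length_pos_iff.mpr hne
  simp only [minDifficulty1_alt, PySem.List.len_eq]
  by_cases hbig : ((jd.length : Int)) < ((D : Int))
  · rw [if_pos hbig]
    have hlt : jd.length - 1 < (D : Int).toNat - 1 := by
      have h2 : jd.length < D := by exact_mod_cast hbig
      omega
    unfold pvE
    rw [pvDpF_none jd _ _ hlt]
  · rw [if_neg hbig]
    have hDN : D ≤ jd.length := by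
      have := not_lt.mp hbig
      exact_mod_cast this
    have h0 : (jd.foldl (fun (p : List Int × Int) x => (p.1 ++ [max p.2 x], max p.2 x))
        (([] : List Int), PySem.List.pyGetD jd 0 0)).1 = (List.range jd.length).map (pvPm jd) := by
      rw [PySem.List.pyGetD_zero]
      rw [b_day1 jd hne]
    rw [h0]
    obtain ⟨hlen, hval⟩ := b_outer jd D hD1 hDN _ rfl
    have hv := hval (jd.length - 1) (by omega) (by omega)
    have hcast : ((jd.length : Int)) - 1 = (((jd.length - 1 : Nat)) : Int) := by omega
    rw [hcast, PySem.List.pyGetD_natCast]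
    unfold pvE
    rw [Int.toNat_natCast, ← hv]
    rfl

-- ---- A-side ----
lemma getDO_getElem (l : List (Option Int)) (i : Nat) (d : Option Int) (h : i < l.length) :
    l.getD i d = l[i] := by
  simp [List.getD, List.getElem?_eq_getElem h]

lemma set_getD_selfO (l : List (Option Int)) (i : Nat) (d : Option Int) (h : i < l.length) :
    l.set i (l.getD i d) = l := by
  rw [getDO_getElem l i d h]
  exact List.set_getElem_self h


-- a fold that repeatedly writes row iN of the matrix collapses to one row-level fold
lemma mset_row_fold (iN : Nat) (w : Nat → Int) :
    ∀ (js : List Nat) (mm : List (List Int)), iN < mm.length →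
      js.foldl (fun (mm : List (List Int)) (jN : Nat) => mSet mm (iN : Int) (jN : Int)
          (max (mGet mm (iN : Int) ((jN : Int) - 1)) (w jN))) mm
      = PySem.List.pySetD mm (iN : Int)
          (js.foldl (fun (r : List Int) (jN : Nat) => PySem.List.pySetD r (jN : Int)
            (max (PySem.List.pyGetD r ((jN : Int) - 1) 0) (w jN))) (mm.getD iN [])) := by
  intro js
  induction js with
  | nil =>
    intro mm hi
    simp only [List.foldl_nil, PySem.List.pySetD_natCast, List.getD_eq_getElem?_getD,
      List.getElem?_eq_getElem hi, Option.getD_some]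
    exact (List.set_getElem_self hi).symm
  | cons j js ih =>
    intro mm hi
    rw [List.foldl_cons, List.foldl_cons]
    have hrow : mGet mm (iN : Int) ((j : Int) - 1) = PySem.List.pyGetD (mm.getD iN []) ((j : Int) - 1) 0 := by
      unfold mGet
      rw [PySem.List.pyGetD_natCast]
    have hstep : mSet mm (iN : Int) (j : Int) (max (mGet mm (iN : Int) ((j : Int) - 1)) (w j))
        = PySem.List.pySetD mm (iN : Int)
            (PySem.List.pySetD (mm.getD iN []) (j : Int)
              (max (PySem.List.pyGetD (mm.getD iN []) ((j : Int) - 1) 0) (w j))) := by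
      unfold mSet
      rw [hrow, PySem.List.pyGetD_natCast]
    rw [hstep]
    have hlen : iN < (PySem.List.pySetD mm (iN : Int)
        (PySem.List.pySetD (mm.getD iN []) (j : Int)
          (max (PySem.List.pyGetD (mm.getD iN []) ((j : Int) - 1) 0) (w j)))).length := by
      rw [PySem.List.pySetD_natCast, List.length_set]
      exact hi
    rw [ih _ hlen]
    rw [PySem.List.pySetD_natCast, PySem.List.pySetD_natCast, PySem.List.pySetD_natCast]
    rw [getDL_set_self _ _ _ _ hi, List.set_set]
    rw [PySem.List.pySetD_natCast]

-- a fold that repeatedly updates cell (iN, lN), reading only rows ≠ iN, collapses to a cell-level fold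
lemma dpset_cell_fold (iN lN : Nat) (K : Int) (G : Nat → Int) :
    ∀ (js : List Nat) (dp : List (List (Option Int))), iN < dp.length → lN < (dp.getD iN []).length →
      (∀ j ∈ js, j ≠ iN) →
      js.foldl (fun (dpAcc : List (List (Option Int))) (jN : Nat) => dpSet dpAcc (iN : Int) (lN : Int)
          (ominO (dpGet dpAcc (iN : Int) (lN : Int))
            (oaddI (dpGet dpAcc (jN : Int) K) (G jN)))) dp
      = dpSet dp (iN : Int) (lN : Int)
          (js.foldl (fun (acc : Option Int) (jN : Nat) => ominO acc (oaddI (dpGet dp (jN : Int) K) (G jN)))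
            (dpGet dp (iN : Int) (lN : Int))) := by
  intro js
  induction js with
  | nil =>
    intro dp hi hrow _
    simp only [List.foldl_nil]
    unfold dpSet dpGet
    simp only [PySem.List.pySetD_natCast, PySem.List.pyGetD_natCast]
    rw [set_getD_selfO _ _ _ hrow]
    simp only [List.getD_eq_getElem?_getD, List.getElem?_eq_getElem hi, Option.getD_some]
    exact (List.set_getElem_self hi).symm
  | cons j js ih =>
    intro dp hi hrow hne
    rw [List.foldl_cons, List.foldl_cons]
    have hji : j ≠ iN := hne j (by simp)
    have h1 : dpSet dp (iN : Int) (lN : Int)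
        (ominO (dpGet dp (iN : Int) (lN : Int)) (oaddI (dpGet dp (j : Int) K) (G j)))
        = dp.set iN ((dp.getD iN []).set lN
            (ominO (dpGet dp (iN : Int) (lN : Int)) (oaddI (dpGet dp (j : Int) K) (G j)))) := by
      unfold dpSet
      rw [PySem.List.pySetD_natCast, PySem.List.pyGetD_natCast, PySem.List.pySetD_natCast]
    set v := ominO (dpGet dp (iN : Int) (lN : Int)) (oaddI (dpGet dp (j : Int) K) (G j)) with hv
    rw [h1]
    have hlen1 : iN < (dp.set iN ((dp.getD iN []).set lN v)).length := by
      rw [List.length_set]; exact hi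
    have hlen2 : lN < ((dp.set iN ((dp.getD iN []).set lN v)).getD iN []).length := by
      rw [getDL_set_self _ _ _ _ hi, List.length_set]; exact hrow
    rw [ih _ hlen1 hlen2 (fun x hx => hne x (by simp [hx]))]
    have hgetcell : dpGet (dp.set iN ((dp.getD iN []).set lN v)) (iN : Int) (lN : Int) = v := by
      unfold dpGet
      simp only [PySem.List.pyGetD_natCast]
      rw [getDL_set_self _ _ _ _ hi, getDO_set_self _ _ _ _ hrow]
    have hgetrow : ∀ jN : Nat, jN ≠ iN →
        dpGet (dp.set iN ((dp.getD iN []).set lN v)) (jN : Int) K = dpGet dp (jN : Int) K := by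
      intro jN hjN
      unfold dpGet
      simp only [PySem.List.pyGetD_natCast]
      rw [getDL_set_ne _ _ _ _ _ (fun h => hjN h.symm)]
    have hbody : ∀ (acc : Option Int) (jN : Nat), jN ∈ js →
        (fun (acc : Option Int) (jN : Nat) => ominO acc (oaddI (dpGet (dp.set iN ((dp.getD iN []).set lN v)) (jN : Int) K) (G jN))) acc jN
        = (fun (acc : Option Int) (jN : Nat) => ominO acc (oaddI (dpGet dp (jN : Int) K) (G jN))) acc jN := by
      intro acc jN hjN
      beta_reduce
      rw [hgetrow jN (hne jN (by simp [hjN]))]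
    rw [PySem.List.foldl_congr_mem (h := fun acc x hx => hbody acc x hx)]
    rw [hgetcell]
    unfold dpSet
    simp only [PySem.List.pyGetD_natCast, PySem.List.pySetD_natCast]
    rw [getDL_set_self _ _ _ _ hi, List.set_set, List.set_set]

lemma getD_map_const {α β : Type} (l : List α) (c d : β) (r : Nat) (h : r < l.length) :
    (l.map (fun _ => c)).getD r d = c := by
  rw [List.getD_eq_getElem?_getD, List.getElem?_map, List.getElem?_eq_getElem h]
  rfl

lemma getD_map_none {α : Type} (l : List α) (k : Nat) :
    (l.map (fun _ => (none : Option Int))).getD k none = none := by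
  rw [List.getD_eq_getElem?_getD, List.getElem?_map]
  cases l[k]? <;> rfl

lemma getDL_getElem {α : Type} (l : List (List α)) (i : Nat) (h : i < l.length) :
    l.getD i [] = l[i] := by
  simp [List.getD, List.getElem?_eq_getElem h]

lemma pySetD_zero {α : Type} (xs : List α) (v : α) : PySem.List.pySetD xs 0 v = xs.set 0 v := by
  rw [PySem.List.pySetD_of_nonneg xs v (by norm_num : (0 : Int) ≤ 0)]
  norm_num

lemma dpSet_zero (dp : List (List (Option Int))) (v : Option Int) :
    dpSet dp 0 0 v = dp.set 0 ((dp.getD 0 []).set 0 v) := by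
  unfold dpSet
  rw [PySem.List.pyGetD_zero, pySetD_zero, pySetD_zero]

lemma a_m (jd : List Int) :
    ∀ mres, mres = (PySem.List.pyRange 0 (jd.length : Int) 1).foldl (fun mAcc i =>
        (PySem.List.pyRange (i + 1) (jd.length : Int) 1).foldl
          (fun mAcc j => mSet mAcc i j (max (mGet mAcc i (j - 1)) (PySem.List.pyGetD jd j 0)))
          (mSet mAcc i i (PySem.List.pyGetD jd i 0)))
        ((PySem.List.pyRange 0 (jd.length : Int) 1).map
          (fun _ => (PySem.List.pyRange 0 (jd.length : Int) 1).map (fun _ => (0 : Int)))) →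
      mres.length = jd.length ∧ (∀ r : Nat, r < jd.length → (mres.getD r []).length = jd.length)
        ∧ ∀ a b : Nat, a ≤ b → b < jd.length → (mres.getD a []).getD b 0 = pvSm jd a b := by
  intro mres hres
  have hr0 : PySem.List.pyRange 0 (jd.length : Int) 1
      = (List.range' 0 jd.length).map (fun k : Nat => (k : Int)) := by
    have h := pyRange_natCast 0 jd.length
    simpa using h
  rw [hr0, List.foldl_map] at hres
  have key := range'_foldl_inv
    (P := fun i m => m.length = jd.length ∧ (∀ r : Nat, r < jd.length → (m.getD r []).length = jd.length)
      ∧ ∀ a b : Nat, a < i → a ≤ b → b < jd.length → (m.getD a []).getD b 0 = pvSm jd a b)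
    (f := fun (mAcc : List (List Int)) (iN : Nat) =>
        (PySem.List.pyRange ((iN : Int) + 1) (jd.length : Int) 1).foldl
          (fun mAcc j => mSet mAcc (iN : Int) j (max (mGet mAcc (iN : Int) (j - 1)) (PySem.List.pyGetD jd j 0)))
          (mSet mAcc (iN : Int) (iN : Int) (PySem.List.pyGetD jd (iN : Int) 0)))
    jd.length 0
    (((List.range' 0 jd.length).map (fun k : Nat => (k : Int))).map
      (fun _ => ((List.range' 0 jd.length).map (fun k : Nat => (k : Int))).map (fun _ => (0 : Int))))
    ?hinit ?hstep
  case hinit =>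
    refine ⟨by simp, ?_, ?_⟩
    · intro r hr
      rw [getD_map_const _ _ _ _ (by simpa using hr)]
      simp
    · intro a b ha _ _
      omega
  case hstep =>
    intro iN m hi0 hiN hP
    beta_reduce
    obtain ⟨hPlen, hProw, hPval⟩ := hP
    have hiN' : iN < jd.length := by omega
    have hiNm : iN < m.length := by omega
    have hinit1 : mSet m (iN : Int) (iN : Int) (PySem.List.pyGetD jd (iN : Int) 0)
        = m.set iN ((m.getD iN []).set iN (jd.getD iN 0)) := by
      unfold mSet
      simp only [PySem.List.pyGetD_natCast, PySem.List.pySetD_natCast]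
    rw [hinit1]
    have hc1 : ((iN : Int) + 1) = (((iN + 1 : Nat)) : Int) := by push_cast; ring
    have hr1 : PySem.List.pyRange ((iN : Int) + 1) (jd.length : Int) 1
        = (List.range' (iN + 1) (jd.length - (iN + 1))).map (fun k : Nat => (k : Int)) := by
      rw [hc1]; exact pyRange_natCast (iN + 1) jd.length
    rw [hr1, List.foldl_map]
    rw [mset_row_fold iN (fun jN => PySem.List.pyGetD jd (jN : Int) 0) _ _ (by rw [List.length_set]; exact hiNm)]
    have hrowget : (m.set iN ((m.getD iN []).set iN (jd.getD iN 0))).getD iN []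
        = (m.getD iN []).set iN (jd.getD iN 0) := getDL_set_self _ _ _ _ hiNm
    rw [hrowget]
    have hrowlen : ((m.getD iN []).set iN (jd.getD iN 0)).length = jd.length := by
      rw [List.length_set]; exact hProw iN hiN'
    have hbody : ∀ (r : List Int) (jN : Nat), jN ∈ List.range' (iN + 1) (jd.length - (iN + 1)) →
        (fun (r : List Int) (jN : Nat) => PySem.List.pySetD r (jN : Int)
          (max (PySem.List.pyGetD r ((jN : Int) - 1) 0) (PySem.List.pyGetD jd (jN : Int) 0))) r jN
        = (fun (r : List Int) (jN : Nat) => r.set jN (max (r.getD (jN - 1) 0) (jd.getD jN 0))) r jN := by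
      intro r jN hjN
      have hjmem := List.mem_range'.mp hjN
      have hj1 : ((jN : Int) - 1) = (((jN - 1 : Nat)) : Int) := by omega
      beta_reduce
      rw [hj1]
      simp only [PySem.List.pyGetD_natCast, PySem.List.pySetD_natCast]
    rw [PySem.List.foldl_congr_mem (h := fun acc x hx => hbody acc x hx)]
    have keyrow := range'_foldl_inv
      (P := fun b r => r.length = jd.length ∧ ∀ t, iN ≤ t → t < b → r.getD t 0 = pvSm jd iN t)
      (f := fun (r : List Int) (jN : Nat) => r.set jN (max (r.getD (jN - 1) 0) (jd.getD jN 0)))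
      (jd.length - (iN + 1)) (iN + 1) ((m.getD iN []).set iN (jd.getD iN 0))
      ?hrinit ?hrstep
    case hrinit =>
      refine ⟨hrowlen, ?_⟩
      intro t ht1 ht2
      have ht : t = iN := by omega
      rw [ht, getD_set_self _ _ _ _ (by rw [hProw iN hiN']; exact hiN'), pvSm_self]
    case hrstep =>
      intro jN r hj1 hj2 hQ
      beta_reduce
      obtain ⟨hQlen, hQval⟩ := hQ
      constructor
      · rw [List.length_set]; exact hQlen
      · intro t ht1 ht2
        by_cases htj : t = jN
        · subst htj
          rw [getD_set_self _ _ _ _ (by rw [hQlen]; omega)]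
          rw [hQval (t - 1) (by omega) (by omega)]
          have hs := pvSm_succ jd iN (t - 1) (by omega)
          have he : t - 1 + 1 = t := by omega
          rw [he] at hs
          rw [← hs]
        · rw [getD_set_ne _ _ _ _ _ (fun h => htj h.symm)]
          exact hQval t ht1 (by omega)
    have hfin : iN + 1 + (jd.length - (iN + 1)) = jd.length := by omega
    rw [hfin] at keyrow
    obtain ⟨hRlen, hRval⟩ := keyrow
    rw [PySem.List.pySetD_natCast, List.set_set]
    refine ⟨by rw [List.length_set]; exact hPlen, ?_, ?_⟩
    · intro r hr
      by_cases hri : r = iN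
      · subst hri
        rw [getDL_set_self _ _ _ _ hiNm]
        exact hRlen
      · rw [getDL_set_ne _ _ _ _ _ (fun h => hri h.symm)]
        exact hProw r hr
    · intro a b ha hab hb
      by_cases hai : a = iN
      · subst hai
        rw [getDL_set_self _ _ _ _ hiNm]
        exact hRval b hab hb
      · rw [getDL_set_ne _ _ _ _ _ (fun h => hai h.symm)]
        exact hPval a b (by omega) hab hb
  have hfin0 : 0 + jd.length = jd.length := by omega
  rw [hfin0] at key
  obtain ⟨k1, k2, k3⟩ := key
  rw [hres]
  exact ⟨k1, k2, fun a b hab hb => k3 a b (by omega) hab hb⟩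

lemma a_col0 (jd : List Int) (D : Nat) (hne : jd ≠ []) (hD1 : 1 ≤ D) :
    ∀ res, res = (PySem.List.pyRange 1 (jd.length : Int) 1).foldl (fun dpAcc i =>
        dpSet dpAcc i 0 (omaxI (dpGet dpAcc (i - 1) 0) (PySem.List.pyGetD jd i 0)))
        (dpSet ((PySem.List.pyRange 0 (jd.length : Int) 1).map
            (fun _ => (PySem.List.pyRange 0 (D : Int) 1).map (fun _ => (none : Option Int))))
          0 0 (some (PySem.List.pyGetD jd 0 0))) →
      res.length = jd.length ∧ (∀ r : Nat, r < jd.length → (res.getD r []).length = D)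
        ∧ ∀ (r k : Nat), r < jd.length →
            (res.getD r []).getD k none = if k = 0 then some (pvPm jd r) else none := by
  intro res hres
  have hN1 : 1 ≤ jd.length := List.length_pos_iff.mpr hne
  have hr1 : PySem.List.pyRange 1 (jd.length : Int) 1
      = (List.range' 1 (jd.length - 1)).map (fun k : Nat => (k : Int)) := by
    have h := pyRange_natCast 1 jd.length
    simpa using h
  rw [hr1, List.foldl_map, dpSet_zero] at hres
  set dp0 : List (List (Option Int)) := (PySem.List.pyRange 0 (jd.length : Int) 1).map
      (fun _ => (PySem.List.pyRange 0 (D : Int) 1).map (fun _ => (none : Option Int))) with hdp0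
  have hdp0len : dp0.length = jd.length := by rw [hdp0]; simp
  have hdp0row : ∀ r : Nat, r < jd.length → dp0.getD r []
      = (PySem.List.pyRange 0 (D : Int) 1).map (fun _ => (none : Option Int)) := by
    intro r hr
    rw [hdp0]
    exact getD_map_const _ _ _ _ (by simpa using hr)
  have hrowNlen : ((PySem.List.pyRange 0 (D : Int) 1).map (fun _ => (none : Option Int))).length = D := by
    simp
  have hrowNval : ∀ k : Nat, ((PySem.List.pyRange 0 (D : Int) 1).map
      (fun _ => (none : Option Int))).getD k none = none := fun k => getD_map_none _ k
  have key := range'_foldl_inv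
    (P := fun i dp => dp.length = jd.length ∧ (∀ r : Nat, r < jd.length → (dp.getD r []).length = D)
      ∧ ∀ (r k : Nat), r < jd.length →
          (dp.getD r []).getD k none = if k = 0 ∧ r < i then some (pvPm jd r) else none)
    (f := fun (dpAcc : List (List (Option Int))) (iN : Nat) =>
        dpSet dpAcc (iN : Int) 0 (omaxI (dpGet dpAcc ((iN : Int) - 1) 0) (PySem.List.pyGetD jd (iN : Int) 0)))
    (jd.length - 1) 1 (dp0.set 0 ((dp0.getD 0 []).set 0 (some (PySem.List.pyGetD jd 0 0))))
    ?hinit ?hstep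
  case hinit =>
    have h0len : 0 < dp0.length := by omega
    refine ⟨by rw [List.length_set]; exact hdp0len, ?_, ?_⟩
    · intro r hr
      by_cases hr0 : r = 0
      · subst hr0
        rw [getDL_set_self _ _ _ _ h0len, List.length_set, hdp0row 0 (by omega)]
        exact hrowNlen
      · rw [getDL_set_ne _ _ _ _ _ (fun h => hr0 h.symm), hdp0row r hr]
        exact hrowNlen
    · intro r k hr
      by_cases hr0 : r = 0
      · subst hr0
        rw [getDL_set_self _ _ _ _ h0len, hdp0row 0 (by omega)]
        by_cases hk0 : k = 0
        · subst hk0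
          rw [getDO_set_self _ _ _ _ (by rw [hrowNlen]; omega)]
          rw [PySem.List.pyGetD_zero]
          simp [pvPm]
        · rw [getDO_set_ne _ _ _ _ _ (fun h => hk0 h.symm), hrowNval k]
          simp [hk0]
      · rw [getDL_set_ne _ _ _ _ _ (fun h => hr0 h.symm), hdp0row r hr, hrowNval k]
        have hcnd : ¬ (k = 0 ∧ r < 1) := by omega
        rw [if_neg hcnd]
  case hstep =>
    intro iN dp hi1 hiN hP
    beta_reduce
    obtain ⟨hPlen, hProw, hPval⟩ := hP
    have hiN' : iN < jd.length := by omega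
    have hiNm : iN < dp.length := by omega
    have hwrite : dpSet dp (iN : Int) 0 (omaxI (dpGet dp ((iN : Int) - 1) 0) (PySem.List.pyGetD jd (iN : Int) 0))
        = dp.set iN ((dp.getD iN []).set 0
            (omaxI (dpGet dp ((iN : Int) - 1) 0) (PySem.List.pyGetD jd (iN : Int) 0))) := by
      unfold dpSet
      rw [pySetD_zero]
      simp only [PySem.List.pyGetD_natCast, PySem.List.pySetD_natCast]
    have hread : omaxI (dpGet dp ((iN : Int) - 1) 0) (PySem.List.pyGetD jd (iN : Int) 0)
        = some (pvPm jd iN) := by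
      have hc : ((iN : Int) - 1) = (((iN - 1 : Nat)) : Int) := by omega
      unfold dpGet
      rw [hc]
      simp only [PySem.List.pyGetD_natCast, PySem.List.pyGetD_zero]
      rw [hPval (iN - 1) 0 (by omega)]
      rw [if_pos ⟨by trivial, by omega⟩]
      have hs : pvPm jd (iN - 1 + 1) = max (pvPm jd (iN - 1)) (jd.getD (iN - 1 + 1) 0) := rfl
      have he : iN - 1 + 1 = iN := by omega
      rw [he] at hs
      rw [hs]
      rfl
    rw [hwrite, hread]
    refine ⟨by rw [List.length_set]; exact hPlen, ?_, ?_⟩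
    · intro r hr
      by_cases hri : r = iN
      · rw [hri, getDL_set_self _ _ _ _ hiNm, List.length_set]
        exact hProw iN hiN'
      · rw [getDL_set_ne _ _ _ _ _ (fun h => hri h.symm)]
        exact hProw r hr
    · intro r k hr
      by_cases hri : r = iN
      · rw [hri, getDL_set_self _ _ _ _ hiNm]
        by_cases hk0 : k = 0
        · rw [hk0, getDO_set_self _ _ _ _ (by rw [hProw iN hiN']; omega)]
          have hcnd : (0 = 0 ∧ iN < iN + 1) := by omega
          rw [if_pos hcnd]
        · rw [getDO_set_ne _ _ _ _ _ (fun h => hk0 h.symm), hPval iN k hiN']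
          have h1 : ¬ (k = 0 ∧ iN < iN) := by omega
          have h2 : ¬ (k = 0 ∧ iN < iN + 1) := by omega
          rw [if_neg h1, if_neg h2]
      · rw [getDL_set_ne _ _ _ _ _ (fun h => hri h.symm), hPval r k hr]
        by_cases hk0 : k = 0 ∧ r < iN
        · have h2 : (k = 0 ∧ r < iN + 1) := by omega
          rw [if_pos hk0, if_pos h2]
        · have h2 : ¬ (k = 0 ∧ r < iN + 1) := by
            intro hc
            exact hk0 ⟨hc.1, by omega⟩
          rw [if_neg hk0, if_neg h2]
  have hfin : 1 + (jd.length - 1) = jd.length := by omega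
  rw [hfin] at key
  rw [hres]
  obtain ⟨h1, h2, h3⟩ := key
  refine ⟨h1, h2, ?_⟩
  intro r k hr
  rw [h3 r k hr]
  by_cases hk : k = 0
  · simp [hk, hr]
  · simp [hk]

lemma a_main (jd : List Int) (D : Nat) (hD1 : 1 ≤ D) (m : List (List Int))
    (Hm : ∀ a b : Nat, a ≤ b → b < jd.length → (m.getD a []).getD b 0 = pvSm jd a b)
    (dp0 : List (List (Option Int)))
    (h0len : dp0.length = jd.length)
    (h0row : ∀ r : Nat, r < jd.length → (dp0.getD r []).length = D)
    (h0val : ∀ r k : Nat, r < jd.length →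
      (dp0.getD r []).getD k none = if k = 0 then some (pvPm jd r) else none) :
    ∀ res, res = (PySem.List.pyRange 1 (D : Int) 1).foldl (fun dpAcc l =>
        (PySem.List.pyRange 0 (jd.length : Int) 1).foldl (fun dpAcc i =>
          (PySem.List.pyRange (l - 1) i 1).foldl (fun dpAcc j =>
            dpSet dpAcc i l (ominO (dpGet dpAcc i l)
              (oaddI (dpGet dpAcc j (l - 1)) (mGet m (j + 1) i)))) dpAcc) dpAcc) dp0 →
      res.length = jd.length ∧ ∀ r k : Nat, r < jd.length →
        (res.getD r []).getD k none = if k < D then pvDpF jd k r else none := by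
  intro res hres
  have hrD : PySem.List.pyRange 1 (D : Int) 1 = (List.range' 1 (D - 1)).map (fun k : Nat => (k : Int)) := by
    have h := pyRange_natCast 1 D
    simpa using h
  rw [hrD, List.foldl_map] at hres
  have key := range'_foldl_inv
    (P := fun l dp => dp.length = jd.length ∧ (∀ r : Nat, r < jd.length → (dp.getD r []).length = D)
      ∧ ∀ r k : Nat, r < jd.length →
          (dp.getD r []).getD k none = if k < l then pvDpF jd k r else none)
    (f := fun (dpAcc : List (List (Option Int))) (lN : Nat) =>
        (PySem.List.pyRange 0 (jd.length : Int) 1).foldl (fun dpAcc i =>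
          (PySem.List.pyRange ((lN : Int) - 1) i 1).foldl (fun dpAcc j =>
            dpSet dpAcc i (lN : Int) (ominO (dpGet dpAcc i (lN : Int))
              (oaddI (dpGet dpAcc j ((lN : Int) - 1)) (mGet m (j + 1) i)))) dpAcc) dpAcc)
    (D - 1) 1 dp0 ?hinit ?hstep
  case hinit =>
    refine ⟨h0len, h0row, ?_⟩
    intro r k hr
    rw [h0val r k hr]
    by_cases hk : k = 0
    · rw [if_pos hk, if_pos (by omega)]
      rw [hk]
      rfl
    · rw [if_neg hk, if_neg (by omega)]
  case hstep =>
    intro lN dp hl1 hlD hP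
    beta_reduce
    obtain ⟨hPlen, hProw, hPval⟩ := hP
    have hlD' : lN < D := by omega
    have hrm : PySem.List.pyRange 0 (jd.length : Int) 1
        = (List.range' 0 jd.length).map (fun k : Nat => (k : Int)) := by
      have h := pyRange_natCast 0 jd.length
      simpa using h
    rw [hrm, List.foldl_map]
    have key2 := range'_foldl_inv
      (P := fun b dp2 => dp2.length = jd.length ∧ (∀ r : Nat, r < jd.length → (dp2.getD r []).length = D)
        ∧ ∀ r k : Nat, r < jd.length →
            (dp2.getD r []).getD k none = if k < lN then pvDpF jd k r
              else if k = lN ∧ r < b then pvDpF jd lN r else none)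
      (f := fun (dpAcc : List (List (Option Int))) (iN : Nat) =>
          (PySem.List.pyRange ((lN : Int) - 1) ((iN : Int)) 1).foldl (fun dpAcc j =>
            dpSet dpAcc ((iN : Int)) (lN : Int) (ominO (dpGet dpAcc ((iN : Int)) (lN : Int))
              (oaddI (dpGet dpAcc j ((lN : Int) - 1)) (mGet m (j + 1) ((iN : Int)))))) dpAcc)
      jd.length 0 dp ?h2init ?h2step
    case h2init =>
      refine ⟨hPlen, hProw, ?_⟩
      intro r k hr
      rw [hPval r k hr]
      by_cases hk : k < lN
      · rw [if_pos hk, if_pos hk]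
      · rw [if_neg hk, if_neg hk, if_neg (by omega)]
    case h2step =>
      intro iN dp2 hi0 hiN2 hQ
      beta_reduce
      obtain ⟨hQlen, hQrow, hQval⟩ := hQ
      have hiN' : iN < jd.length := by omega
      by_cases hsmall : iN < lN
      · have hnil : PySem.List.pyRange ((lN : Int) - 1) ((iN : Int)) 1 = [] := by
          apply PySem.List.pyRange_one_eq_nil
          omega
        rw [hnil, List.foldl_nil]
        refine ⟨hQlen, hQrow, ?_⟩
        intro r k hr
        rw [hQval r k hr]
        by_cases hk : k < lN
        · rw [if_pos hk, if_pos hk]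
        · rw [if_neg hk, if_neg hk]
          by_cases hk2 : k = lN ∧ r < iN
          · rw [if_pos hk2, if_pos ⟨hk2.1, by omega⟩]
          · by_cases hk3 : k = lN ∧ r < iN + 1
            · have hreq : r = iN := by omega
              rw [if_neg hk2, if_pos hk3, hreq, pvDpF_none jd lN iN hsmall]
            · rw [if_neg hk2, if_neg hk3]
      · have hli : lN ≤ iN := by omega
        have hc : ((lN : Int) - 1) = (((lN - 1 : Nat)) : Int) := by omega
        rw [hc]
        have hr2 : PySem.List.pyRange (((lN - 1 : Nat)) : Int) ((iN : Int)) 1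
            = (List.range' (lN - 1) (iN - (lN - 1))).map (fun k : Nat => (k : Int)) := by
          have h := pyRange_natCast (lN - 1) iN
          rw [h]
        rw [hr2, List.foldl_map]
        rw [dpset_cell_fold iN lN (((lN - 1 : Nat)) : Int) (fun jN => mGet m ((jN : Int) + 1) ((iN : Int)))
          _ _ (by omega) (by rw [hQrow iN hiN']; omega)
          (by intro j hj; have := List.mem_range'.mp hj; omega)]
        have hstart : dpGet dp2 ((iN : Int)) ((lN : Int)) = none := by
          unfold dpGet
          simp only [PySem.List.pyGetD_natCast]
          rw [hQval iN lN hiN']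
          rw [if_neg (by omega), if_neg (by omega)]
        have hbody : ∀ (acc : Option Int), ∀ jN ∈ List.range' (lN - 1) (iN - (lN - 1)),
            (fun (acc : Option Int) (jN : Nat) => ominO acc
              (oaddI (dpGet dp2 ((jN : Int)) (((lN - 1 : Nat)) : Int)) (mGet m ((jN : Int) + 1) ((iN : Int))))) acc jN
            = (fun (acc : Option Int) (jN : Nat) => ominO acc
              (oaddI (pvDpF jd (lN - 1) jN) (pvSm jd (jN + 1) iN))) acc jN := by
          intro acc jN hjN
          obtain ⟨kq, hkq, hjkq⟩ := List.mem_range'.mp hjN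
          have hjm1 : lN - 1 ≤ jN := by omega
          have hjm2 : jN < iN := by omega
          beta_reduce
          have hg1 : dpGet dp2 ((jN : Int)) (((lN - 1 : Nat)) : Int) = pvDpF jd (lN - 1) jN := by
            unfold dpGet
            simp only [PySem.List.pyGetD_natCast]
            rw [hQval jN (lN - 1) (by omega)]
            rw [if_pos (by omega)]
          have hg2 : mGet m ((jN : Int) + 1) ((iN : Int)) = pvSm jd (jN + 1) iN := by
            unfold mGet
            have hcj : ((jN : Int) + 1) = (((jN + 1 : Nat)) : Int) := by push_cast; ring
            rw [hcj]
            simp only [PySem.List.pyGetD_natCast]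
            exact Hm (jN + 1) iN (by omega) hiN'
          rw [hg1, hg2]
        rw [PySem.List.foldl_congr_mem (h := fun acc x hx => hbody acc x hx)]
        rw [hstart]
        have hdpf : (List.range' (lN - 1) (iN - (lN - 1))).foldl
            (fun (acc : Option Int) (jN : Nat) => ominO acc
              (oaddI (pvDpF jd (lN - 1) jN) (pvSm jd (jN + 1) iN))) none
            = pvDpF jd (lN - 1 + 1) iN := rfl
        rw [hdpf]
        have hsucc : lN - 1 + 1 = lN := by omega
        rw [hsucc]
        have hwrite : dpSet dp2 ((iN : Int)) ((lN : Int)) (pvDpF jd lN iN)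
            = dp2.set iN ((dp2.getD iN []).set lN (pvDpF jd lN iN)) := by
          unfold dpSet
          simp only [PySem.List.pyGetD_natCast, PySem.List.pySetD_natCast]
        rw [hwrite]
        have hiNm : iN < dp2.length := by omega
        refine ⟨by rw [List.length_set]; exact hQlen, ?_, ?_⟩
        · intro r hr
          by_cases hri : r = iN
          · rw [hri, getDL_set_self _ _ _ _ hiNm, List.length_set]
            exact hQrow iN hiN'
          · rw [getDL_set_ne _ _ _ _ _ (fun h => hri h.symm)]
            exact hQrow r hr
        · intro r k hr
          by_cases hri : r = iN
          · rw [hri, getDL_set_self _ _ _ _ hiNm]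
            by_cases hkl : k = lN
            · rw [hkl, getDO_set_self _ _ _ _ (by rw [hQrow iN hiN']; omega)]
              rw [if_neg (by omega), if_pos (by omega)]
            · rw [getDO_set_ne _ _ _ _ _ (fun h => hkl h.symm), hQval iN k hiN']
              by_cases hk : k < lN
              · rw [if_pos hk, if_pos hk]
              · rw [if_neg hk, if_neg hk, if_neg (by omega), if_neg (by omega)]
          · rw [getDL_set_ne _ _ _ _ _ (fun h => hri h.symm), hQval r k hr]
            by_cases hk : k < lN
            · rw [if_pos hk, if_pos hk]
            · rw [if_neg hk, if_neg hk]
              by_cases hk2 : k = lN ∧ r < iN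
              · rw [if_pos hk2, if_pos ⟨hk2.1, by omega⟩]
              · have hk3 : ¬ (k = lN ∧ r < iN + 1) := by
                  intro hc
                  exact hk2 ⟨hc.1, by omega⟩
                rw [if_neg hk2, if_neg hk3]
    have hfinN : 0 + jd.length = jd.length := by omega
    rw [hfinN] at key2
    obtain ⟨k1, k2, k3⟩ := key2
    refine ⟨k1, k2, ?_⟩
    intro r k hr
    rw [k3 r k hr]
    by_cases hk : k < lN
    · rw [if_pos hk, if_pos (by omega)]
    · by_cases hk2 : k = lN
      · rw [if_neg hk, if_pos ⟨hk2, hr⟩, if_pos (by omega), hk2]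
      · rw [if_neg hk, if_neg (by omega), if_neg (by omega)]
  have hfinD : 1 + (D - 1) = D := by omega
  rw [hfinD] at key
  rw [hres]
  exact ⟨key.1, key.2.2⟩

lemma a_final (jd : List Int) (D : Nat) (hD1 : 1 ≤ D) (hN1 : 1 ≤ jd.length)
    (res : List (List (Option Int))) (hlen : res.length = jd.length)
    (hval : ∀ r k : Nat, r < jd.length →
      (res.getD r []).getD k none = if k < D then pvDpF jd k r else none) :
    PySem.List.pyGetD (PySem.List.pyGetD res (-1) []) ((D : Int) - 1) none
      = pvDpF jd (D - 1) (jd.length - 1) := by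
  have hne2 : res ≠ [] := by
    intro h
    rw [h] at hlen
    simp at hlen
    omega
  rw [PySem.List.pyGetD_neg_one res [] hne2, List.getLast_eq_getElem]
  have hgl : res[res.length - 1]'(by omega) = res.getD (jd.length - 1) [] := by
    rw [getDL_getElem _ _ (by omega)]
    congr 1
    omega
  rw [hgl]
  have hcD : ((D : Int) - 1) = (((D - 1 : Nat)) : Int) := by omega
  rw [hcD, PySem.List.pyGetD_natCast]
  rw [hval (jd.length - 1) (D - 1) (by omega), if_pos (by omega)]

lemma A_eq (jd : List Int) (d : Int) (hne : jd ≠ []) (hd : 1 ≤ d) :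
    minDifficulty1 jd d = pvE jd d := by
  obtain ⟨D, rfl⟩ : ∃ D : Nat, d = (D : Int) := ⟨d.toNat, by omega⟩
  have hD1 : 1 ≤ D := by exact_mod_cast hd
  have hN1 : 1 ≤ jd.length := List.length_pos_iff.mpr hne
  simp only [minDifficulty1, PySem.List.len_eq]
  obtain ⟨hm1, hm2, hm3⟩ := a_m jd _ rfl
  obtain ⟨hc1, hc2, hc3⟩ := a_col0 jd D hne hD1 _ rfl
  obtain ⟨hr1, hr3⟩ := a_main jd D hD1 _ hm3 _ hc1 hc2 hc3 _ rfl
  rw [a_final jd D hD1 hN1 _ hr1 hr3]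
  unfold pvE
  rw [Int.toNat_natCast]

-- ===== VERDICT (by name: the statement is the Claim_ definition above) =====
theorem minDifficulty1_spec : Claim_equal_minDifficulty1 := by
  intro jd d _ hpre
  unfold Spec_minDifficulty1
  rw [A_eq jd d hpre.1 hpre.2, B_eq jd d hpre.1 hpre.2]
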